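-- pv_equiv track=rewrite | github.com/RC219805/Transformation_Portal | material_response.py | _boxcount
-- ===== SOURCE A (Python) =====
-- from typing import Any, Dict, Iterable, List, Mapping, Sequence, Tuple
--
-- def _boxcount(binary: Sequence[Sequence[bool]], size: int) -> int:
--     """Count non-empty boxes of the given ``size`` for ``binary`` data."""
--
--     if size <= 0:
--         raise ValueError("size must be positive")
--
--     rows = len(binary)
--     cols = len(binary[0]) if rows else 0
--     if rows == 0 or cols == 0:
--         return 0
--
--     trimmed_rows = rows - (rows % size)
--     trimmed_cols = cols - (cols % size)
--     if trimmed_rows == 0 or trimmed_cols == 0: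
--         return 0
--
--     count = 0
--     for row in range(0, trimmed_rows, size):
--         for col in range(0, trimmed_cols, size):
--             occupied = False
--             for dr in range(size):
--                 if occupied:
--                     break
--                 for dc in range(size):
--                     if binary[row + dr][col + dc]:
--                         occupied = True
--                         break
--             if occupied:
--                 count += 1
--
--     return count
-- ===== SOURCE B (Python) =====
-- def _boxcount(binary, size):
--     """Count non-empty boxes of the given ``size`` for ``binary`` data."""
--
--     if size <= 0:
--         raise ValueError("size must be positive")
--
--     if not binary or not binary[0]:
--         return 0
--
--     band_cols = len(binary[0]) // size * size
--     count = 0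
--     for top in range(0, len(binary) // size * size, size):
--         merged = [any(binary[top + d][c] for d in range(size))
--                   for c in range(band_cols)]
--         for left in range(0, band_cols, size):
--             if any(merged[left + d] for d in range(size)):
--                 count += 1
--     return count
-- ===== Notes on version B (the rewrite author's own statement) =====
-- stated objective: alternative
-- what changed: Replaces A's box-by-box scan with nested early-exit break loops by a two-stage pass per horizontal band: OR-merge each band's size rows into one boolean row (a comprehension), then count the size-wide chunks of that merged row that contain a True.
-- outside the precondition, e.g. on _boxcount([[True, False], [True]], 2): A returns 1, B raises IndexError
import Mathlib
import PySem

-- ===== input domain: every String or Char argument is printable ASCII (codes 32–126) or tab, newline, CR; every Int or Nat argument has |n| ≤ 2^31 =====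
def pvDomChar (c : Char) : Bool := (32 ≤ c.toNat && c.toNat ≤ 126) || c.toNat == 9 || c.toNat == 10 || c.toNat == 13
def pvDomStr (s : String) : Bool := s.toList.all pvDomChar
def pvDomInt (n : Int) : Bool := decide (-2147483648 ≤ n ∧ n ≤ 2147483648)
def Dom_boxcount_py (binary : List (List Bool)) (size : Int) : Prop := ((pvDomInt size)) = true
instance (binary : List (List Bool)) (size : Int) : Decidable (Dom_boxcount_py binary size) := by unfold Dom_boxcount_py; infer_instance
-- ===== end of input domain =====

-- B replaces A's box-by-box early-exit scan by OR-merging each size-row band into one row and counting its non-empty size-wide chunks (alternative decomposition; same cost).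


-- ===== PORT A =====
-- binary[r][c]; exact where both indices are in range (Pre_ guarantees this for every access)
def bcCell (binary : List (List Bool)) (r c : Int) : Bool :=
  PySem.List.pyGetD (PySem.List.pyGetD binary r []) c false

def boxcount_py (binary : List (List Bool)) (size : Int) : Int :=
  if size ≤ 0 then 0  -- Python raises ValueError here; excluded by Pre_
  else
    let rows : Int := binary.length
    let cols : Int := if rows ≠ 0 then ((PySem.List.pyGetD binary 0 []).length : Int) else 0
    if rows = 0 ∨ cols = 0 then 0
    else
      let tr := rows - PySem.Int.mod rows size
      let tc := cols - PySem.Int.mod cols size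
      if tr = 0 ∨ tc = 0 then 0
      else
        (PySem.List.pyRange 0 tr size).foldl (fun count row =>
          (PySem.List.pyRange 0 tc size).foldl (fun count col =>
            if (PySem.List.pyRange 0 size 1).any (fun dr =>
                 (PySem.List.pyRange 0 size 1).any (fun dc =>
                   bcCell binary (row + dr) (col + dc)))
            then count + 1 else count) count) 0

-- ===== PORT B =====
def boxcount_py_alt (binary : List (List Bool)) (size : Int) : Int :=
  if size ≤ 0 then 0  -- raise ValueError; excluded by Pre_
  else if binary.length = 0 ∨ (binary.headD []).length = 0 then 0
  else
    let bandCols : Int := PySem.Int.floordiv ((binary.headD []).length : Int) size * size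
    (PySem.List.pyRange 0 (PySem.Int.floordiv ((binary.length : Int)) size * size) size).foldl
      (fun count top =>
        let merged : List Bool := (PySem.List.pyRange 0 bandCols 1).map (fun c =>
          (PySem.List.pyRange 0 size 1).any (fun d =>
            PySem.List.pyGetD (PySem.List.pyGetD binary (top + d) []) c false))
        (PySem.List.pyRange 0 bandCols size).foldl (fun count left =>
          if (PySem.List.pyRange 0 size 1).any (fun d =>
               PySem.List.pyGetD merged (left + d) false)
          then count + 1 else count) count) 0

-- ===== PRECONDITION & SPEC =====
-- Pre_ excludes size ≤ 0 (A raises ValueError) and ragged grids in which a row among the first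
-- trimmed_rows rows is shorter than trimmed_cols: there A's early-exit scan may return while B's
-- full band sweep raises IndexError.
def Pre_boxcount_py (binary : List (List Bool)) (size : Int) : Prop :=
  1 ≤ size ∧
  ∀ row ∈ binary.take ((binary.length : Int) - PySem.Int.mod (binary.length : Int) size).toNat,
    ((binary.headD []).length : Int) - PySem.Int.mod ((binary.headD []).length : Int) size
      ≤ (row.length : Int)
instance (binary : List (List Bool)) (size : Int) : Decidable (Pre_boxcount_py binary size) := by
  unfold Pre_boxcount_py; infer_instance

def pvWitness_boxcount_py : List (List Bool) × Int :=
  ([[true, false, true], [false, false, false], [true, true, false]], 2)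

def Spec_boxcount_py (binary : List (List Bool)) (size : Int) (out : Int) : Prop := out = boxcount_py_alt binary size
instance (binary : List (List Bool)) (size : Int) (out : Int) : Decidable (Spec_boxcount_py binary size out) := by unfold Spec_boxcount_py; infer_instance

-- ===== CLAIM (what is proved, stated in full; the proofs are below) =====
def Claim_equal_boxcount_py : Prop := ∀ (binary : List (List Bool)) (size : Int), Dom_boxcount_py binary size → Pre_boxcount_py binary size → Spec_boxcount_py binary size (boxcount_py binary size)

-- ===== LEMMAS AND PROOFS =====

lemma pyRange_step_dvd (tr size : Int) (hs : 0 < size) (hd : size ∣ tr) :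
    PySem.List.pyRange 0 tr size = (List.range (tr / size).toNat).map (fun k : Nat => size * (k : Int)) := by
  rw [PySem.List.pyRange_of_pos 0 tr hs]
  obtain ⟨q, rfl⟩ := hd
  rw [Int.mul_ediv_cancel_left _ (ne_of_gt hs)]
  by_cases h : (0:Int) < size * q
  · rw [if_pos h]
    have hq : 0 < q := by nlinarith
    have h1 : size * q - 0 + size - 1 = (size - 1) + size * q := by ring
    rw [h1, Int.add_mul_ediv_left _ _ (ne_of_gt hs),
        Int.ediv_eq_zero_of_lt (by omega) (by omega), zero_add]
    exact List.map_congr_left (fun k hk => by ring)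
  · rw [if_neg h]
    have hq : q ≤ 0 := by nlinarith
    have : q.toNat = 0 := by omega
    simp [this]

lemma any_swap {α β : Type} (l1 : List α) (l2 : List β) (f : α → β → Bool) :
    l1.any (fun a => l2.any (fun b => f a b)) = l2.any (fun b => l1.any (fun a => f a b)) := by
  rw [Bool.eq_iff_iff]
  simp only [List.any_eq_true]
  tauto

lemma foldl_const {α : Type} (l : List α) (a : Int) : l.foldl (fun c _ => c) a = a := by
  induction l generalizing a with
  | nil => rfl
  | cons x xs ih => simpa using ih a

-- the per-band core: A's per-box double scan of one band equals B's merged-row chunk scan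
lemma band_eq (f : Int → Int → Bool) (size tc top : Int) (hs : 0 < size) (hdc : size ∣ tc)
    (acc : Int) :
    (PySem.List.pyRange 0 tc size).foldl (fun count col =>
        if (PySem.List.pyRange 0 size 1).any (fun dr =>
             (PySem.List.pyRange 0 size 1).any (fun dc => f (top + dr) (col + dc)))
        then count + 1 else count) acc
    = (PySem.List.pyRange 0 tc size).foldl (fun count left =>
        if (PySem.List.pyRange 0 size 1).any (fun d =>
             PySem.List.pyGetD
               ((PySem.List.pyRange 0 tc 1).map (fun c =>
                 (PySem.List.pyRange 0 size 1).any (fun d' => f (top + d') c)))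
               (left + d) false)
        then count + 1 else count) acc := by
  refine PySem.List.foldl_congr_mem _ _ _ _ (fun a left hmem => ?_)
  rw [pyRange_step_dvd tc size hs hdc] at hmem
  obtain ⟨k, hk, rfl⟩ := List.mem_map.mp hmem
  have hk' : k < (tc / size).toNat := List.mem_range.mp hk
  have hq : size * (tc / size) = tc := Int.mul_ediv_cancel' hdc
  have hkub : size * ((k : Int) + 1) ≤ tc := by
    have h1 : ((k : Int) + 1) ≤ tc / size := by omega
    calc size * ((k : Int) + 1) ≤ size * (tc / size) := by
          exact mul_le_mul_of_nonneg_left h1 hs.le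
      _ = tc := hq
  have h2 : (PySem.List.pyRange 0 size 1).any (fun d =>
      PySem.List.pyGetD
        ((PySem.List.pyRange 0 tc 1).map (fun c =>
          (PySem.List.pyRange 0 size 1).any (fun d' => f (top + d') c)))
        (size * (k : Int) + d) false)
      = (PySem.List.pyRange 0 size 1).any (fun d =>
          (PySem.List.pyRange 0 size 1).any (fun d' => f (top + d') (size * (k : Int) + d))) := by
    refine PySem.List.any_congr_mem (fun d hd => ?_)
    have hdb := (PySem.List.mem_pyRange_one).mp hd
    have h0 : 0 ≤ size * (k : Int) + d := by
      have hk0 : (0:Int) ≤ size * (k : Int) := by positivity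
      omega
    have h1 : size * (k : Int) + d < tc := by nlinarith
    exact PySem.List.pyGetD_map_pyRange_of_nonneg _ tc _ false h0 h1
  have h3 := any_swap (PySem.List.pyRange 0 size 1) (PySem.List.pyRange 0 size 1)
    (fun d d' => f (top + d') (size * (k : Int) + d))
  rw [h2, h3]

-- ===== VERDICT (by name: the statement is the Claim_ definition above) =====
theorem boxcount_py_spec : Claim_equal_boxcount_py := by
  intro binary size _ hpre
  obtain ⟨hs1, -⟩ := hpre
  have hs : (0:Int) < size := by omega
  simp only [Spec_boxcount_py, boxcount_py, boxcount_py_alt,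
    if_neg (show ¬ size ≤ 0 by omega)]
  cases binary with
  | nil => simp
  | cons h t =>
    simp only [PySem.List.pyGetD_zero_cons, List.headD_cons]
    have hlen : (((h :: t).length : Nat) : Int) ≠ 0 := Int.natCast_ne_zero.mpr (by simp)
    rw [if_pos hlen]
    by_cases hc : h.length = 0
    · have hcI : ((h.length : Nat) : Int) = 0 := by exact_mod_cast hc
      rw [if_pos (Or.inr hcI), if_pos (Or.inr hc)]
    · have hcI : ((h.length : Nat) : Int) ≠ 0 := by exact_mod_cast hc
      have hgA : ¬((((h :: t).length : Nat) : Int) = 0 ∨ ((h.length : Nat) : Int) = 0) := by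
        push_neg; exact ⟨hlen, hcI⟩
      have hgB : ¬((h :: t).length = 0 ∨ h.length = 0) := by simp [hc]
      rw [if_neg hgA, if_neg hgB]
      have htrA : (((h :: t).length : Nat) : Int) - PySem.Int.mod (((h :: t).length : Nat) : Int) size
          = size * ((((h :: t).length : Nat) : Int) / size) := by
        rw [PySem.Int.mod_eq_emod_of_pos hs, Int.emod_def]; ring
      have htcA : ((h.length : Nat) : Int) - PySem.Int.mod ((h.length : Nat) : Int) size
          = size * (((h.length : Nat) : Int) / size) := by
        rw [PySem.Int.mod_eq_emod_of_pos hs, Int.emod_def]; ring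
      have htrB : PySem.Int.floordiv (((h :: t).length : Nat) : Int) size * size
          = size * ((((h :: t).length : Nat) : Int) / size) := by
        rw [PySem.Int.floordiv_eq_ediv_of_pos hs]; ring
      have htcB : PySem.Int.floordiv ((h.length : Nat) : Int) size * size
          = size * (((h.length : Nat) : Int) / size) := by
        rw [PySem.Int.floordiv_eq_ediv_of_pos hs]; ring
      simp only [htrA, htcA, htrB, htcB]
      by_cases htz : size * ((((h :: t).length : Nat) : Int) / size) = 0
        ∨ size * (((h.length : Nat) : Int) / size) = 0
      · rw [if_pos htz]
        have hnil : PySem.List.pyRange 0 0 size = [] := by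
          rw [pyRange_step_dvd 0 size hs ⟨0, by ring⟩]; simp
        rcases htz with h0 | h0
        · rw [h0, hnil]
          simp
        · rw [h0, hnil]
          simp only [List.foldl_nil]
          exact (foldl_const _ 0).symm
      · rw [if_neg htz]
        refine PySem.List.foldl_congr_mem _ _ _ _ (fun acc top _ => ?_)
        simp only [bcCell]
        exact band_eq (fun r c => PySem.List.pyGetD (PySem.List.pyGetD (h :: t) r []) c false)
          size (size * (((h.length : Nat) : Int) / size)) top hs ⟨_, rfl⟩ acc
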